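-- pv_equiv track=rewrite | github.com/Sheng-J/plp | doc.py | batch_docs_by_len
-- ===== SOURCE A (Python) =====
-- def sort_docs_by_len(docs):
--     doc_len_tuples = [(doc, len(doc)) for doc in docs]
--     return sorted(doc_len_tuples, key=lambda x: x[1])
--
-- def batch_docs_by_len(batch_size, batch_seq_len, docs):
--     sorted_doc_len_tuples = sort_docs_by_len(docs)
--     # pdb.set_trace()
--     doc_len_iter = iter(sorted_doc_len_tuples)
--     items = []
--     item_lens = []
--     while True:
--         try:
--             doc, doc_len = next(doc_len_iter)
--             items.append(doc)
--             item_lens.append(doc_len)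
--         except StopIteration:
--             break
--
--         if (item_lens[-1]-1)//batch_seq_len != (item_lens[0]-1)//batch_seq_len:
--             yield items[:-1], item_lens[:-1]
--             items = [items[-1]]
--             item_lens = [item_lens[-1]]
--
--         if len(items) == batch_size:
--             yield items, item_lens
--             items = []
--             item_lens = []
-- ===== SOURCE B (Python) =====
-- # B: sort once, split the sorted list into maximal contiguous bucket-runs
-- # ((len-1)//batch_seq_len constant), chunk each run into batch_size slices,
-- # then drop the overall trailing batch iff it is partial, and yield.
-- def _bucket_runs(pairs, batch_seq_len):
--     if not pairs:
--         return []
--     b = (pairs[0][1] - 1) // batch_seq_len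
--     i = 1
--     while i < len(pairs) and (pairs[i][1] - 1) // batch_seq_len == b:
--         i += 1
--     return [pairs[:i]] + _bucket_runs(pairs[i:], batch_seq_len)
--
-- def _chunks(run, batch_size):
--     if not run:
--         return []
--     return [run[:batch_size]] + _chunks(run[batch_size:], batch_size)
--
-- def batch_docs_by_len(batch_size, batch_seq_len, docs):
--     pairs = sorted(((d, len(d)) for d in docs), key=lambda p: p[1])
--     batches = []
--     for run in _bucket_runs(pairs, batch_seq_len):
--         for chunk in _chunks(run, batch_size):
--             batches.append(([d for d, _ in chunk], [n for _, n in chunk]))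
--     if batches and len(batches[-1][0]) < batch_size:
--         batches.pop()
--     yield from batches
-- ===== Notes on version B (the rewrite author's own statement) =====
-- stated objective: alternative
-- what changed: Replaces A's single stateful buffer loop (boundary-check + size-check per element of the generator) by a three-stage decomposition: split the sorted list into maximal contiguous bucket-runs, slice each run into batch_size chunks, then drop the overall trailing batch iff it is partial.
-- outside the precondition, e.g. on batch_docs_by_len(0, 1, ['a', 'bb']): A returns [(['a'], [1])], B raises RecursionError; on batch_docs_by_len(-1, 3, ['a', 'bb']): A returns [], B raises RecursionError; on batch_docs_by_len(1, 0, ['a']): A raises ZeroDivisionError, B raises ZeroDivisionError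
import Mathlib
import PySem

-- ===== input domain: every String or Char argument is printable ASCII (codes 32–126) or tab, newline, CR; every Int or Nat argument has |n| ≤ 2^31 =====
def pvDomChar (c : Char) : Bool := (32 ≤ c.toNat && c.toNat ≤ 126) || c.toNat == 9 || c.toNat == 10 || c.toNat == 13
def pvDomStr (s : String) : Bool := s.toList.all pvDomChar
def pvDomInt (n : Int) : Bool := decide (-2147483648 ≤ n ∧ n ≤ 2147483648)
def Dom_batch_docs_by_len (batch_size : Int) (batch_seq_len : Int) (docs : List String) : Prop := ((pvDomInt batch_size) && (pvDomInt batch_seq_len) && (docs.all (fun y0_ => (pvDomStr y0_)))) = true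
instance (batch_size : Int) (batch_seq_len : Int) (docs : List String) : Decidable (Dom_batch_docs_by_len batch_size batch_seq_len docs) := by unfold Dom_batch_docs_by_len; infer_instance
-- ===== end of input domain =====

-- B replaces A's single stateful buffer loop by sort → bucket-runs → fixed-size chunks →
-- drop the trailing partial batch (objective: alternative decomposition, same cost).
-- Both versions compare the list of yielded batches of the Python generators.

-- ===== PORT A =====
-- the while/try loop of A: state (items, item_lens) plus the accumulated yields.
-- item_lens[-1] / item_lens[0] are taken with getLastD/headD: the list is nonempty there.
def aLoop (batch_size : Int) (batch_seq_len : Int) :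
    List (String × Int) → List String → List Int →
    List (List String × List Int) → List (List String × List Int)
  | [], _items, _lens, acc => acc
  | (doc, doc_len) :: rest, items, lens, acc =>
    let items1 := items ++ [doc]
    let lens1 := lens ++ [doc_len]
    if PySem.Int.floordiv (lens1.getLastD 0 - 1) batch_seq_len ≠
       PySem.Int.floordiv (lens1.headD 0 - 1) batch_seq_len then
      let acc1 := acc ++ [(items1.dropLast, lens1.dropLast)]
      let items2 := [items1.getLastD ""]
      let lens2 := [lens1.getLastD 0]
      if (items2.length : Int) = batch_size then
        aLoop batch_size batch_seq_len rest [] [] (acc1 ++ [(items2, lens2)])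
      else
        aLoop batch_size batch_seq_len rest items2 lens2 acc1
    else
      if (items1.length : Int) = batch_size then
        aLoop batch_size batch_seq_len rest [] [] (acc ++ [(items1, lens1)])
      else
        aLoop batch_size batch_seq_len rest items1 lens1 acc

def batch_docs_by_len (batch_size : Int) (batch_seq_len : Int) (docs : List String) : List (List String × List Int) :=
  let sorted_doc_len_tuples :=
    PySem.List.sorted (docs.map (fun doc => (doc, PySem.Str.len doc))) (fun x => x.2) false
  aLoop batch_size batch_seq_len sorted_doc_len_tuples [] [] []

-- ===== PORT B =====
-- the while loop of _bucket_runs: longest prefix whose bucket equals b, plus the rest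
def runSpan (batch_seq_len : Int) (b : Int) :
    List (String × Int) → List (String × Int) × List (String × Int)
  | [] => ([], [])
  | p :: rest =>
    if PySem.Int.floordiv (p.2 - 1) batch_seq_len = b then
      let s := runSpan batch_seq_len b rest
      (p :: s.1, s.2)
    else ([], p :: rest)

theorem runSpan_snd_length_le (batch_seq_len b : Int) :
    ∀ l : List (String × Int), (runSpan batch_seq_len b l).2.length ≤ l.length := by
  intro l
  induction l with
  | nil => simp [runSpan]
  | cons p rest ih =>
    simp only [runSpan]
    split
    · simpa using Nat.le_succ_of_le ih
    · simp

def bucketRuns (batch_seq_len : Int) : List (String × Int) → List (List (String × Int))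
  | [] => []
  | p :: rest =>
    let b := PySem.Int.floordiv (p.2 - 1) batch_seq_len
    let s := runSpan batch_seq_len b rest
    (p :: s.1) :: bucketRuns batch_seq_len s.2
termination_by l => l.length
decreasing_by
  exact Nat.lt_succ_of_le (runSpan_snd_length_le _ _ _)

-- _chunks; the `batch_size ≤ 0` guard only makes the recursion total (outside Pre_ the Python recurses forever)
def chunksB (batch_size : Int) (run : List (String × Int)) : List (List (String × Int)) :=
  if run = [] ∨ batch_size ≤ 0 then []
  else run.take batch_size.toNat :: chunksB batch_size (run.drop batch_size.toNat)
termination_by run.length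
decreasing_by
  rename_i h
  push_neg at h
  have h1 : run.length ≠ 0 := by simpa using fun hh => h.1 (List.eq_nil_of_length_eq_zero hh)
  have h2 : 1 ≤ batch_size.toNat := by omega
  simp only [List.length_drop]
  omega

-- `if batches and len(batches[-1][0]) < batch_size: batches.pop()`
def dropTailPartial (batch_size : Int) (batches : List (List String × List Int)) :
    List (List String × List Int) :=
  match batches.getLast? with
  | none => batches
  | some lb => if (lb.1.length : Int) < batch_size then batches.dropLast else batches

def batch_docs_by_len_alt (batch_size : Int) (batch_seq_len : Int) (docs : List String) : List (List String × List Int) :=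
  let pairs :=
    PySem.List.sorted (docs.map (fun d => (d, PySem.Str.len d))) (fun p => p.2) false
  let batches :=
    (bucketRuns batch_seq_len pairs).flatMap
      (fun run => (chunksB batch_size run).map (fun c => (c.map Prod.fst, c.map Prod.snd)))
  dropTailPartial batch_size batches

-- ===== PRECONDITION & SPEC =====
-- Pre_ excludes batch_seq_len = 0 with nonempty docs (A raises ZeroDivisionError) and
-- batch_size ≤ 0, outside the natural domain of a batch size, where A's values (dropping
-- whole runs / only emitting boundary partials) are accidental and B does not return.
def Pre_batch_docs_by_len (batch_size : Int) (batch_seq_len : Int) (docs : List String) : Prop :=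
  1 ≤ batch_size ∧ (batch_seq_len ≠ 0 ∨ docs = [])
instance (batch_size : Int) (batch_seq_len : Int) (docs : List String) : Decidable (Pre_batch_docs_by_len batch_size batch_seq_len docs) := by unfold Pre_batch_docs_by_len; infer_instance

def pvWitness_batch_docs_by_len : Int × Int × List String := (2, 3, ["a", "bb", "cccc", "ddddd"])

def Spec_batch_docs_by_len (batch_size : Int) (batch_seq_len : Int) (docs : List String) (out : List (List String × List Int)) : Prop := out = batch_docs_by_len_alt batch_size batch_seq_len docs
instance (batch_size : Int) (batch_seq_len : Int) (docs : List String) (out : List (List String × List Int)) : Decidable (Spec_batch_docs_by_len batch_size batch_seq_len docs out) := by unfold Spec_batch_docs_by_len; infer_instance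

-- ===== CLAIM (what is proved, stated in full; the proofs are below) =====
def Claim_equal_batch_docs_by_len : Prop := ∀ (batch_size : Int) (batch_seq_len : Int) (docs : List String), Dom_batch_docs_by_len batch_size batch_seq_len docs → Pre_batch_docs_by_len batch_size batch_seq_len docs → Spec_batch_docs_by_len batch_size batch_seq_len docs (batch_docs_by_len batch_size batch_seq_len docs)

-- ===== LEMMAS AND PROOFS =====

-- proof-side helpers
def packP (c : List (String × Int)) : List String × List Int := (c.map Prod.fst, c.map Prod.snd)

-- the full batch_size-chunks of a list together with the leftover tail (shorter than batch_size)
def splitFull {α : Type} (k : Nat) (l : List α) : List (List α) × List α :=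
  if h : 0 < k ∧ k ≤ l.length then
    let t := splitFull k (l.drop k)
    (l.take k :: t.1, t.2)
  else ([], l)
termination_by l.length
decreasing_by
  simp only [List.length_drop]; omega

-- what A's generator yields, expressed over the run decomposition
def emitRuns (k : Nat) : List (List (String × Int)) → List (List String × List Int)
  | [] => []
  | [R] => ((splitFull k R).1).map packP
  | R :: R2 :: Rs =>
    ((splitFull k R).1 ++ (if (splitFull k R).2.isEmpty then [] else [(splitFull k R).2])).map packP
      ++ emitRuns k (R2 :: Rs)

theorem splitFull_small {α : Type} (k : Nat) (l : List α) (h : l.length < k) :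
    splitFull k l = ([], l) := by
  rw [splitFull]; simp; omega

theorem splitFull_step {α : Type} (k : Nat) (c t : List α) (hk : 0 < k) (hc : c.length = k) :
    splitFull k (c ++ t) = ((c :: (splitFull k t).1), (splitFull k t).2) := by
  rw [splitFull]
  have h : 0 < k ∧ k ≤ (c ++ t).length := by simp [hc]; omega
  rw [dif_pos h]
  simp [← hc, List.take_left, List.drop_left]

theorem splitFull_rem_lt {α : Type} (k : Nat) (hk : 0 < k) :
    ∀ l : List α, (splitFull k l).2.length < k := by
  intro l
  induction hn : l.length using Nat.strong_induction_on generalizing l with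
  | _ n ih =>
    rw [splitFull]
    by_cases h : 0 < k ∧ k ≤ l.length
    · rw [dif_pos h]
      exact ih ((l.drop k).length) (by simp; omega) _ rfl
    · rw [dif_neg h]; simp; omega

theorem splitFull_rem_mem {α : Type} (k : Nat) :
    ∀ l : List α, ∀ x ∈ (splitFull k l).2, x ∈ l := by
  intro l
  induction hn : l.length using Nat.strong_induction_on generalizing l with
  | _ n ih =>
    rw [splitFull]
    by_cases h : 0 < k ∧ k ≤ l.length
    · rw [dif_pos h]
      intro x hx
      exact List.mem_of_mem_drop (ih ((l.drop k).length) (by simp; omega) _ rfl x hx)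
    · rw [dif_neg h]; exact fun x hx => hx

theorem splitFull_full_len {α : Type} (k : Nat) :
    ∀ l : List α, ∀ c ∈ (splitFull k l).1, c.length = k := by
  intro l
  induction hn : l.length using Nat.strong_induction_on generalizing l with
  | _ n ih =>
    rw [splitFull]
    by_cases h : 0 < k ∧ k ≤ l.length
    · rw [dif_pos h]
      intro c hc
      rcases List.mem_cons.mp hc with rfl | hc'
      · simp; omega
      · exact ih ((l.drop k).length) (by simp; omega) _ rfl c hc'
    · rw [dif_neg h]; simp

theorem chunksB_eq (k : Nat) (hk : 0 < k) :
    ∀ l : List (String × Int),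
      chunksB (k : Int) l =
        (splitFull k l).1 ++ (if (splitFull k l).2.isEmpty then [] else [(splitFull k l).2]) := by
  intro l
  induction hn : l.length using Nat.strong_induction_on generalizing l with
  | _ n ih =>
    rw [chunksB]
    by_cases hnil : l = []
    · subst hnil
      simp [splitFull_small k [] (by simpa using hk)]
    · rw [if_neg (by simp [hnil]; omega)]
      by_cases h : k ≤ l.length
      · have : l = l.take k ++ l.drop k := (List.take_append_drop k l).symm
        rw [splitFull]
        rw [dif_pos ⟨hk, h⟩]
        have htn : (k : Int).toNat = k := by simp
        rw [htn, ih ((l.drop k).length) (by simp; omega) _ rfl]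
        simp
      · have h2 : l.length < k := by omega
        rw [splitFull_small k l h2]
        have hle : l.length ≤ k := le_of_lt h2
        have htn : ((k : Int).toNat) = k := by simp
        rw [htn, List.take_of_length_le hle, List.drop_eq_nil_of_le hle, chunksB]
        simp [hnil]

theorem chunksB_ne_nil (k : Nat) (hk : 0 < k) (l : List (String × Int)) (hl : l ≠ []) :
    chunksB (k : Int) l ≠ [] := by
  rw [chunksB, if_neg (by simp [hl]; omega)]
  simp

theorem dropTailPartial_append (bs : Int) (xs ys : List (List String × List Int)) (hys : ys ≠ []) :
    dropTailPartial bs (xs ++ ys) = xs ++ dropTailPartial bs ys := by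
  unfold dropTailPartial
  rw [List.getLast?_append_of_ne_nil xs hys]
  cases hg : ys.getLast? with
  | none => simp_all
  | some lb =>
    by_cases hlt : (lb.1.length : Int) < bs
    · simp [hlt, List.dropLast_append_of_ne_nil hys]
    · simp [hlt]

-- A's accumulator is a pure prefix
theorem aLoop_acc (bs bsl : Int) :
    ∀ (L : List (String × Int)) items lens acc,
      aLoop bs bsl L items lens acc = acc ++ aLoop bs bsl L items lens [] := by
  intro L
  induction L with
  | nil => intro items lens acc; simp [aLoop]
  | cons p rest ih =>
    intro items lens acc
    obtain ⟨doc, doc_len⟩ := p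
    simp only [aLoop]
    split
    · split
      · rw [ih]; conv_rhs => rw [ih]
        simp
      · rw [ih]; conv_rhs => rw [ih]
        simp
    · split
      · rw [ih]; conv_rhs => rw [ih]
        simp
      · exact ih _ _ _

theorem emitB (k : Nat) (hk : 0 < k) :
    ∀ runs : List (List (String × Int)), (∀ R ∈ runs, R ≠ []) →
      dropTailPartial (k : Int)
        (runs.flatMap (fun run => (chunksB (k : Int) run).map (fun c => (c.map Prod.fst, c.map Prod.snd))))
        = emitRuns k runs := by
  intro runs
  induction runs with
  | nil => intro _; simp [dropTailPartial, emitRuns]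
  | cons R Rs ih =>
    intro hne
    have hR : R ≠ [] := hne R (by simp)
    cases Rs with
    | nil =>
      simp only [List.flatMap_cons, List.flatMap_nil, List.append_nil]
      rw [chunksB_eq k hk R]
      cases hrem : (splitFull k R).2 with
      | nil =>
        simp only [List.isEmpty_nil, if_pos, List.append_nil]
        unfold dropTailPartial
        cases hg : ((splitFull k R).1.map (fun c => (c.map Prod.fst, c.map Prod.snd))).getLast? with
        | none => simp [emitRuns, packP]
        | some lb =>
          obtain ⟨c, hc, rfl⟩ := List.mem_map.mp (List.mem_of_getLast? hg)
          have hck : c.length = k := splitFull_full_len k R c hc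
          simp [emitRuns, packP, hck]
      | cons m ms =>
        simp only [List.isEmpty_cons, if_neg, Bool.false_eq_true, if_false, List.map_append,
          List.map_cons, List.map_nil]
        unfold dropTailPartial
        rw [List.getLast?_concat]
        have hlt : (m :: ms).length < k := by
          have := splitFull_rem_lt k hk R
          rwa [hrem] at this
        have hlt' : ((ms.length + 1 : Nat) : Int) < (k : Int) := by
          exact_mod_cast (by simpa using hlt : ms.length + 1 < k)
        have hlt2 : (ms.length : Int) + 1 < (k : Int) := by push_cast at hlt' ⊢; exact hlt'
        simp [emitRuns, packP, hlt2, List.dropLast_concat]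
    | cons R2 Rs' =>
      have h2 := chunksB_ne_nil k hk R2 (hne R2 (by simp))
      have hmapne :
          ((R2 :: Rs').flatMap (fun run => (chunksB (k : Int) run).map (fun c => (c.map Prod.fst, c.map Prod.snd)))) ≠ [] := by
        intro hc
        simp only [List.flatMap_cons] at hc
        rcases List.append_eq_nil_iff.mp hc with ⟨h1, _⟩
        exact h2 (List.map_eq_nil_iff.mp h1)
      rw [List.flatMap_cons, dropTailPartial_append _ _ _ hmapne,
        ih (fun R' hR' => hne R' (by simp [hR']))]
      rw [chunksB_eq k hk R]
      simp only [emitRuns, packP]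
      split_ifs <;> simp [packP]

-- within one constant-bucket segment A just fills and flushes batch_size-batches
theorem aLoop_run (bs bsl : Int) (k : Nat) (hk : 0 < k) (hbs : bs = (k : Int)) (b : Int) :
    ∀ (R : List (String × Int)) (L' : List (String × Int)) (P : List (String × Int)),
      (∀ p ∈ P ++ R, PySem.Int.floordiv (p.2 - 1) bsl = b) → P.length < k →
      aLoop bs bsl (R ++ L') (P.map Prod.fst) (P.map Prod.snd) [] =
        ((splitFull k (P ++ R)).1).map packP ++
          aLoop bs bsl L' ((splitFull k (P ++ R)).2.map Prod.fst) ((splitFull k (P ++ R)).2.map Prod.snd) [] := by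
  intro R
  induction R with
  | nil =>
    intro L' P hb hP
    rw [List.append_nil, List.nil_append, splitFull_small k P hP]
    simp
  | cons x R' ih =>
    intro L' P hb hP
    obtain ⟨xd, xl⟩ := x
    have hx : PySem.Int.floordiv (xl - 1) bsl = b := by simpa using hb (xd, xl) (by simp)
    have hbP : ∀ p ∈ P, PySem.Int.floordiv (p.2 - 1) bsl = b := fun p hp => hb p (by simp [hp])
    have hlast : ((P.map Prod.snd) ++ [xl]).getLastD 0 = xl := by simp
    have hhead : PySem.Int.floordiv (((P.map Prod.snd ++ [xl]).headD 0) - 1) bsl = b := by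
      cases P with
      | nil => simpa using hx
      | cons p0 P' => simpa using hbP p0 (by simp)
    rw [List.cons_append]
    simp only [aLoop]
    split_ifs with h1 h2 h3
    · exfalso; rw [hlast] at h1; exact h1 (hx.trans hhead.symm)
    · exfalso; rw [hlast] at h1; exact h1 (hx.trans hhead.symm)
    · -- batch full: flush and restart with an empty buffer
      have hlen : (P ++ [(xd, xl)]).length = k := by
        have h3' : ((P.length : Int) + 1) = (k : Int) := by simpa [hbs] using h3
        have hnat : P.length + 1 = k := by exact_mod_cast h3'
        simpa using hnat
      rw [aLoop_acc bs bsl (R' ++ L')]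
      have hb0 : ∀ p ∈ ([] : List (String × Int)) ++ R', PySem.Int.floordiv (p.2 - 1) bsl = b :=
        fun p hp => hb p (by simp at hp ⊢; exact Or.inr (Or.inr hp))
      have h0 := ih L' [] hb0 (by simpa using hk)
      simp only [List.map_nil, List.nil_append] at h0
      rw [h0]
      rw [show P ++ (xd, xl) :: R' = (P ++ [(xd, xl)]) ++ R' by simp]
      rw [splitFull_step k (P ++ [(xd, xl)]) R' hk hlen]
      simp [packP]
    · -- batch not yet full: keep accumulating
      have hlt : (P ++ [(xd, xl)]).length < k := by
        have h3' : ¬ ((P.length : Int) + 1) = (k : Int) := by simpa [hbs] using h3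
        have hnat : P.length + 1 ≠ k := by exact_mod_cast h3'
        simp only [List.length_append, List.length_cons, List.length_nil]
        omega
      have hb' : ∀ p ∈ (P ++ [(xd, xl)]) ++ R', PySem.Int.floordiv (p.2 - 1) bsl = b := by
        intro p hp
        apply hb
        simp only [List.append_assoc, List.singleton_append] at hp
        exact hp
      have h0 := ih L' (P ++ [(xd, xl)]) hb' hlt
      rw [show P ++ (xd, xl) :: R' = (P ++ [(xd, xl)]) ++ R' by simp]
      simpa using h0

-- at a bucket boundary A flushes the leftover buffer and restarts
theorem aLoop_boundary (bs bsl : Int) (k : Nat) (hk : 0 < k) (b : Int) :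
    ∀ (q : String × Int) (M : List (String × Int)) (P : List (String × Int)),
      P ≠ [] → (∀ p ∈ P, PySem.Int.floordiv (p.2 - 1) bsl = b) →
      PySem.Int.floordiv (q.2 - 1) bsl ≠ b → P.length < k →
      aLoop bs bsl (q :: M) (P.map Prod.fst) (P.map Prod.snd) [] =
        packP P :: aLoop bs bsl (q :: M) [] [] [] := by
  intro q M P hPne hbP hq hPlt
  obtain ⟨qd, ql⟩ := q
  cases P with
  | nil => exact absurd rfl hPne
  | cons p0 P' =>
      simp only [aLoop, List.nil_append]
      have hhead : ((((p0 :: P').map Prod.snd) ++ [ql]).headD 0) = p0.2 := by simp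
      have hlast : (((p0 :: P').map Prod.snd) ++ [ql]).getLastD 0 = ql := by
        simp only [List.map_cons, List.cons_append]
        rw [← List.cons_append, List.getLastD_concat]
      have hcond : PySem.Int.floordiv ((((p0 :: P').map Prod.snd ++ [ql]).getLastD 0) - 1) bsl ≠
          PySem.Int.floordiv ((((p0 :: P').map Prod.snd ++ [ql]).headD 0) - 1) bsl := by
        rw [hhead, hlast]
        simpa using fun h => hq (h.trans (hbP p0 (by simp)))
      rw [if_pos hcond]
      have hcond2 : ¬ (PySem.Int.floordiv (([ql].getLastD 0) - 1) bsl ≠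
          PySem.Int.floordiv (([ql].headD 0) - 1) bsl) := by simp
      rw [if_neg hcond2]
      have hitems : ((p0 :: P').map Prod.fst ++ [qd]).dropLast = (p0 :: P').map Prod.fst := by
        simp only [List.map_cons, List.cons_append]
        rw [← List.cons_append, List.dropLast_concat]
      have hlens : ((p0 :: P').map Prod.snd ++ [ql]).dropLast = (p0 :: P').map Prod.snd := by
        simp only [List.map_cons, List.cons_append]
        rw [← List.cons_append, List.dropLast_concat]
      have hil : ((p0 :: P').map Prod.fst ++ [qd]).getLastD "" = qd := by
        simp only [List.map_cons, List.cons_append]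
        rw [← List.cons_append, List.getLastD_concat]
      rw [hitems, hlens, hil, hlast]
      split_ifs with hsz
      · conv_lhs => rw [aLoop_acc bs bsl M [] []]
        conv_rhs => rw [aLoop_acc bs bsl M [] []]
        simp [packP]
      · conv_lhs => rw [aLoop_acc bs bsl M [qd] [ql]]
        simp [packP]
theorem runSpan_fst_bucket (bsl b : Int) :
    ∀ l : List (String × Int), ∀ x ∈ (runSpan bsl b l).1, PySem.Int.floordiv (x.2 - 1) bsl = b := by
  intro l
  induction l with
  | nil => simp [runSpan]
  | cons p rest ih =>
    simp only [runSpan]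
    split
    · rename_i h
      intro x hx
      rcases List.mem_cons.mp hx with rfl | hx'
      · exact h
      · exact ih x hx'
    · simp

theorem runSpan_append (bsl b : Int) :
    ∀ l : List (String × Int), (runSpan bsl b l).1 ++ (runSpan bsl b l).2 = l := by
  intro l
  induction l with
  | nil => simp [runSpan]
  | cons p rest ih =>
    simp only [runSpan]
    split
    · simpa using ih
    · simp

theorem runSpan_snd_head (bsl b : Int) :
    ∀ l : List (String × Int), ∀ q t, (runSpan bsl b l).2 = q :: t →
      PySem.Int.floordiv (q.2 - 1) bsl ≠ b := by
  intro l
  induction l with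
  | nil => simp [runSpan]
  | cons p rest ih =>
    simp only [runSpan]
    split
    · exact fun q t h => ih q t h
    · rename_i h
      intro q t heq
      rw [List.cons.injEq] at heq
      exact heq.1 ▸ h

-- A's loop over the whole sorted list equals the emitted runs
theorem aLoop_main (bs bsl : Int) (k : Nat) (hk : 0 < k) (hbs : bs = (k : Int)) :
    ∀ L : List (String × Int), aLoop bs bsl L [] [] [] = emitRuns k (bucketRuns bsl L) := by
  intro L
  induction hn : L.length using Nat.strong_induction_on generalizing L with
  | _ n ih =>
    cases L with
    | nil => simp [aLoop, bucketRuns, emitRuns]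
    | cons p rest =>
      obtain ⟨r, rest', hsp⟩ : ∃ r rest',
          runSpan bsl (PySem.Int.floordiv (p.2 - 1) bsl) rest = (r, rest') := ⟨_, _, rfl⟩
      have hrs : bucketRuns bsl (p :: rest) = (p :: r) :: bucketRuns bsl rest' := by
        rw [bucketRuns, hsp]
      have hspan : r ++ rest' = rest := by
        have := runSpan_append bsl (PySem.Int.floordiv (p.2 - 1) bsl) rest
        rwa [hsp] at this
      have hL : p :: rest = (p :: r) ++ rest' := by rw [List.cons_append, hspan]
      have hb' : ∀ x ∈ ([] : List (String × Int)) ++ (p :: r),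
          PySem.Int.floordiv (x.2 - 1) bsl = PySem.Int.floordiv (p.2 - 1) bsl := by
        intro x hx
        rcases List.mem_cons.mp (by simpa using hx) with rfl | hx'
        · rfl
        · exact runSpan_fst_bucket bsl _ rest x (by rw [hsp]; exact hx')
      have h1 := aLoop_run bs bsl k hk hbs (PySem.Int.floordiv (p.2 - 1) bsl)
        (p :: r) rest' [] hb' (by simpa using hk)
      simp only [List.map_nil, List.nil_append] at h1
      rw [hrs, hL, h1]
      have hlen' : rest'.length ≤ rest.length := by
        have := runSpan_snd_length_le bsl (PySem.Int.floordiv (p.2 - 1) bsl) rest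
        rwa [hsp] at this
      cases rest' with
      | nil => simp [aLoop, bucketRuns, emitRuns]
      | cons q t =>
        have hq : PySem.Int.floordiv (q.2 - 1) bsl ≠ PySem.Int.floordiv (p.2 - 1) bsl :=
          runSpan_snd_head bsl _ rest q t (by rw [hsp])
        have hIH : aLoop bs bsl (q :: t) [] [] [] = emitRuns k (bucketRuns bsl (q :: t)) := by
          apply ih (q :: t).length ?_ (q :: t) rfl
          simp only [List.length_cons] at hn hlen' ⊢
          omega
        obtain ⟨R2, Rs', hbr⟩ : ∃ R2 Rs', bucketRuns bsl (q :: t) = R2 :: Rs' := by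
          rw [bucketRuns]
          exact ⟨_, _, rfl⟩
        cases hrem : (splitFull k (p :: r)).2 with
        | nil =>
          simp only [List.map_nil]
          rw [hIH, hbr]
          simp [emitRuns, hrem]
        | cons m ms =>
          have hmem : ∀ x ∈ (splitFull k (p :: r)).2,
              PySem.Int.floordiv (x.2 - 1) bsl = PySem.Int.floordiv (p.2 - 1) bsl := by
            intro x hx
            exact hb' x (by simpa using splitFull_rem_mem k (p :: r) x hx)
          have hblem := aLoop_boundary bs bsl k hk (PySem.Int.floordiv (p.2 - 1) bsl)
            q t ((splitFull k (p :: r)).2) (by rw [hrem]; simp) hmem hq (splitFull_rem_lt k hk (p :: r))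
          rw [hrem] at hblem
          rw [hblem, hIH, hbr]
          simp [emitRuns, hrem]

theorem bucketRuns_ne_nil (bsl : Int) :
    ∀ l : List (String × Int), ∀ R ∈ bucketRuns bsl l, R ≠ [] := by
  intro l
  induction hn : l.length using Nat.strong_induction_on generalizing l with
  | _ n ih =>
    cases l with
    | nil => simp [bucketRuns]
    | cons p rest =>
      rw [bucketRuns]
      intro R hR
      rcases List.mem_cons.mp hR with rfl | hR'
      · simp
      · have hlen := runSpan_snd_length_le bsl (PySem.Int.floordiv (p.2 - 1) bsl) rest
        refine ih (runSpan bsl (PySem.Int.floordiv (p.2 - 1) bsl) rest).2.length ?_ _ rfl R hR'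
        simp only [List.length_cons] at hn
        omega

-- ===== VERDICT (by name: the statement is the Claim_ definition above) =====
theorem batch_docs_by_len_spec : Claim_equal_batch_docs_by_len := by
  intro bs bsl docs _hdom hpre
  obtain ⟨hbs1, _⟩ := hpre
  have hk : 0 < bs.toNat := by omega
  have hbs : bs = ((bs.toNat : Nat) : Int) := by omega
  unfold Spec_batch_docs_by_len
  simp only [batch_docs_by_len, batch_docs_by_len_alt]
  rw [aLoop_main bs bsl bs.toNat hk hbs]
  rw [hbs]
  exact (emitB bs.toNat hk _ (fun R hR => bucketRuns_ne_nil bsl _ R hR)).symm
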